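-- pv_equiv track=rewrite | github.com/tofritz/ExampleWork | practice-problems/reddit-dailyprogramming/yahtzee.py | yahtzee
-- ===== SOURCE A (Python) =====
-- def yahtzee(rolls):
--     counts = dict.fromkeys(rolls, 0)
--     for roll in rolls:
--         for key in counts:
--             if key == roll:
--                 counts[key] += roll
--     values = list(counts.values())
--     return max(values)
-- ===== SOURCE B (Python) =====
-- def yahtzee(rolls):
--     s = sorted(rolls)
--     scores = []
--     i = 0
--     n = len(s)
--     while i < n:
--         j = i + 1
--         while j < n and s[j] == s[i]:
--             j += 1
--         scores.append(s[i] * (j - i))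
--         i = j
--     return max(scores)
-- ===== Notes on version B (the rewrite author's own statement) =====
-- stated objective: faster
-- what changed: Replaces A's per-value frequency dict built by a nested scan over all dict keys for every roll with a sort followed by one linear pass over maximal runs of equal values, scoring each run as value*run_length and taking the max of the run scores.
import Mathlib
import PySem

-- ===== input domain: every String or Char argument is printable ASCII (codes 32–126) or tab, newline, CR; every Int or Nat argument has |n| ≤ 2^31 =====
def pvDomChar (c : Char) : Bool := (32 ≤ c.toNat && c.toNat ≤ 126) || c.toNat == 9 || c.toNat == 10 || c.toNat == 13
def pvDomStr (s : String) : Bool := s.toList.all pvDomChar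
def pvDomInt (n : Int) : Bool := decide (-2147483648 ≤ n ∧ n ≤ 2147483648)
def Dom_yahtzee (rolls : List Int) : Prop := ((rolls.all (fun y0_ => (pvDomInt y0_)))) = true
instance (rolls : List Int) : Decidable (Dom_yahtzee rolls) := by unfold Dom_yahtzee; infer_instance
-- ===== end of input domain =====

-- B replaces A's per-value frequency dict (an inner scan of all keys per roll) with sort + one
-- linear pass over maximal runs of equal values, taking max of value*run_length per run.

-- ===== PORT A =====
def yahtzee (rolls : List Int) : Int :=
  -- counts = dict.fromkeys(rolls, 0)
  let counts : PySem.Dict Int Int := PySem.Dict.ofList (rolls.map (fun r => (r, 0)))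
  -- for roll in rolls: for key in counts: if key == roll: counts[key] += roll
  let counts := rolls.foldl (fun d roll =>
    d.keys.foldl (fun d' key =>
      if key == roll then d'.modify key 0 (fun v => v + roll) else d') d) counts
  let values := counts.values
  -- max(values); raises ValueError on empty input (excluded by Pre_), 0 default unreached there
  (PySem.List.max? values (fun y => y)).getD 0

-- ===== PORT B =====
-- the two nested while loops over indices: the inner loop advances j past the run of values equal
-- to s[i] (takeWhile), the outer loop restarts at i = j (dropWhile) and appends s[i]*(j-i)
def pvRunScores (s : List Int) : List Int :=
  match s with
  | [] => []
  | x :: xs =>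
    x * (1 + ((xs.takeWhile (fun y => y == x)).length : Int)) ::
      pvRunScores (xs.dropWhile (fun y => y == x))
termination_by s.length
decreasing_by
  simp only [List.length_cons]
  exact Nat.lt_succ_of_le (List.length_dropWhile_le _ xs)

def yahtzee_alt (rolls : List Int) : Int :=
  -- s = sorted(rolls)
  let s := PySem.List.sorted rolls (fun x => x) false
  -- run scan building scores
  let scores := pvRunScores s
  -- max(scores); raises ValueError on empty input (excluded by Pre_), 0 default unreached there
  (PySem.List.max? scores (fun y => y)).getD 0

-- ===== PRECONDITION & SPEC =====
-- Pre_ excludes only the empty list, on which both Pythons raise ValueError (max of an empty sequence).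
def Pre_yahtzee (rolls : List Int) : Prop := rolls ≠ []
instance (rolls : List Int) : Decidable (Pre_yahtzee rolls) := by unfold Pre_yahtzee; infer_instance
def pvWitness_yahtzee : List Int := [3, 3, 5]
def Spec_yahtzee (rolls : List Int) (out : Int) : Prop := out = yahtzee_alt rolls
instance (rolls : List Int) (out : Int) : Decidable (Spec_yahtzee rolls out) := by unfold Spec_yahtzee; infer_instance

-- ===== CLAIM (what is proved, stated in full; the proofs are below) =====
def Claim_equal_yahtzee : Prop := ∀ (rolls : List Int), Dom_yahtzee rolls → Pre_yahtzee rolls → Spec_yahtzee rolls (yahtzee rolls)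

-- ===== LEMMAS AND PROOFS =====

-- ---- A side: the values list of A's dict is the distinct rolls each scored v * count(v) ----

-- keys of the initial dict are the distinct rolls in first-occurrence order
theorem keys_init (rolls : List Int) :
    (PySem.Dict.ofList ((rolls.map (fun r => (r, (0 : Int)))))).keys = PySem.Set.ofList rolls := by
  show (List.foldl (fun acc p => acc.insert p.1 p.2) PySem.Dict.empty
      (rolls.map (fun r => (r, (0 : Int))))).keys = PySem.Set.ofList rolls
  rw [PySem.Dict.keys_foldl_insert_key (rolls.map (fun r => (r, (0 : Int)))) Prod.fst
      (fun _ p => p.2) PySem.Dict.empty]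
  simp only [List.map_map, PySem.Dict.keys_empty]
  have h : (Prod.fst ∘ fun r : Int => (r, (0 : Int))) = id := rfl
  rw [h, List.map_id]
  rfl

theorem getD_init_aux (l : List Int) (d : PySem.Dict Int Int) (k : Int) (h : d.getD k 0 = 0) :
    (List.foldl (fun acc p => acc.insert p.1 p.2) d (l.map (fun r => (r, (0 : Int))))).getD k 0 = 0 := by
  induction l generalizing d with
  | nil => simpa using h
  | cons r t ih =>
    simp only [List.map_cons, List.foldl_cons]
    exact ih _ (by rw [PySem.Dict.getD_insert]; split <;> simp [h])

theorem getD_init (rolls : List Int) (k : Int) :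
    (PySem.Dict.ofList ((rolls.map (fun r => (r, (0 : Int)))))).getD k 0 = 0 := by
  exact getD_init_aux rolls PySem.Dict.empty k (by simp [PySem.Dict.getD_empty])

-- the inner key scan over the distinct keys adds roll to the entry at roll (at most once)
theorem inner_getD (K : List Int) (hK : K.Nodup) (d : PySem.Dict Int Int) (roll k : Int) :
    (K.foldl (fun d' key => if key == roll then d'.modify key 0 (fun v => v + roll) else d') d).getD k 0
      = d.getD k 0 + (if k = roll ∧ roll ∈ K then roll else 0) := by
  induction K generalizing d with
  | nil => simp
  | cons a t ih =>
    have hnd := List.nodup_cons.mp hK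
    simp only [List.foldl_cons]
    by_cases har : a = roll
    · subst har
      have hnotmem : a ∉ t := hnd.1
      rw [if_pos (by simp), ih hnd.2]
      rw [PySem.Dict.getD_modify]
      by_cases hk : k = a
      · subst hk
        simp [hnotmem]
      · have h1 : ¬ (k = a ∧ a ∈ t) := fun h => hk h.1
        have h2 : (k = a ∧ a ∈ a :: t) ↔ False := by simp [hk]
        simp only [if_neg hk, if_neg h1, h2, if_false, add_zero]
    · rw [if_neg (by simpa using har), ih hnd.2]
      have h2 : (k = roll ∧ roll ∈ a :: t) ↔ (k = roll ∧ roll ∈ t) := by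
        constructor
        · rintro ⟨h1, h2⟩
          rcases List.mem_cons.mp h2 with h | h
          · exact absurd h.symm har
          · exact ⟨h1, h⟩
        · exact fun ⟨h1, h2⟩ => ⟨h1, List.mem_cons_of_mem _ h2⟩
      simp only [h2]

-- the inner scan only rewrites existing values: the key list is unchanged
theorem inner_keys (K : List Int) (d : PySem.Dict Int Int) (roll : Int)
    (hsub : ∀ x ∈ K, x ∈ d.keys) :
    (K.foldl (fun d' key => if key == roll then d'.modify key 0 (fun v => v + roll) else d') d).keys = d.keys := by
  induction K generalizing d with
  | nil => rfl
  | cons a t ih =>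
    simp only [List.foldl_cons]
    by_cases har : a = roll
    · subst har
      rw [if_pos (by simp)]
      have hmem : a ∈ d.keys := hsub a (by simp)
      have hkeys : (d.modify a 0 (fun v => v + a)).keys = d.keys := by
        rw [PySem.Dict.keys_modify]
        exact PySem.Dict.keys_insert_of_contains _ _
          ((PySem.Dict.contains_iff_mem_keys _ _).mpr hmem)
      rw [ih _ (fun x hx => hkeys ▸ hsub x (by simp [hx])), hkeys]
    · rw [if_neg (by simpa using har)]
      exact ih _ (fun x hx => hsub x (by simp [hx]))

-- the outer loop keeps the key list fixed
theorem outer_keys (l : List Int) (d : PySem.Dict Int Int)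
    (hsub : ∀ r ∈ l, r ∈ d.keys) :
    (l.foldl (fun d roll =>
        d.keys.foldl (fun d' key =>
          if key == roll then d'.modify key 0 (fun v => v + roll) else d') d) d).keys = d.keys := by
  induction l generalizing d with
  | nil => rfl
  | cons roll t ih =>
    have hkeys : (d.keys.foldl (fun d' key =>
        if key == roll then d'.modify key 0 (fun v => v + roll) else d') d).keys = d.keys :=
      inner_keys d.keys d roll (fun x hx => hx)
    simp only [List.foldl_cons]
    rw [ih _ (fun r hr => by rw [hkeys]; exact hsub r (by simp [hr])), hkeys]

-- the outer loop: entry at k accumulates k once per occurrence of k among the rolls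
theorem outer_getD (l : List Int) (d : PySem.Dict Int Int) (k : Int)
    (hsub : ∀ r ∈ l, r ∈ d.keys) (hnd : d.keys.Nodup) :
    (l.foldl (fun d roll =>
        d.keys.foldl (fun d' key =>
          if key == roll then d'.modify key 0 (fun v => v + roll) else d') d) d).getD k 0
      = d.getD k 0 + k * (List.count k l : Int) := by
  induction l generalizing d with
  | nil => simp
  | cons roll t ih =>
    have hmem : roll ∈ d.keys := hsub roll (by simp)
    have hkeys : (d.keys.foldl (fun d' key =>
        if key == roll then d'.modify key 0 (fun v => v + roll) else d') d).keys = d.keys :=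
      inner_keys d.keys d roll (fun x hx => hx)
    simp only [List.foldl_cons]
    rw [ih _ (fun r hr => by rw [hkeys]; exact hsub r (by simp [hr])) (by rw [hkeys]; exact hnd)]
    rw [inner_getD d.keys hnd d roll k]
    by_cases hk : k = roll
    · subst hk
      rw [if_pos ⟨rfl, hmem⟩, List.count_cons_self]
      push_cast
      ring
    · rw [if_neg (fun h => hk h.1)]
      have : List.count k (roll :: t) = List.count k t := by
        simp only [List.count_cons]
        simp only [beq_iff_eq, if_neg (show ¬roll = k from fun h => hk h.symm)]
        simp
      rw [this]
      ring

-- A's values list IS the distinct values each scored v * count(v)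
theorem values_char (rolls : List Int) :
    (PySem.Dict.ofList ((rolls.map (fun r => (r, (0 : Int))))) |> (fun c =>
      rolls.foldl (fun d roll =>
        d.keys.foldl (fun d' key =>
          if key == roll then d'.modify key 0 (fun v => v + roll) else d') d) c)).values
      = (PySem.Set.ofList rolls).map (fun v => v * (List.count v rolls : Int)) := by
  have hk0 := keys_init rolls
  have hnd : (PySem.Dict.ofList ((rolls.map (fun r => (r, (0 : Int)))))).keys.Nodup := by
    rw [hk0]; exact PySem.Set.nodup_ofList rolls
  have hsub : ∀ r ∈ rolls, r ∈ (PySem.Dict.ofList ((rolls.map (fun r => (r, (0 : Int)))))).keys := by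
    intro r hr; rw [hk0]; exact (PySem.Set.mem_ofList rolls r).mpr hr
  have hkeys := outer_keys rolls _ hsub
  rw [PySem.Dict.values_eq_map_keys _ (hkeys ▸ hnd) 0, hkeys, hk0]
  apply List.map_congr_left
  intro v hv
  rw [outer_getD rolls _ v hsub hnd, getD_init]
  simp

-- ---- B side: the run scan over a sorted list produces exactly the scores v * count(v) ----

-- membership in the run scores of a sorted list: exactly the per-value scores
theorem runScores_cons (x : Int) (xs : List Int) :
    pvRunScores (x :: xs) = x * (1 + ((xs.takeWhile (fun y => y == x)).length : Int)) ::
      pvRunScores (xs.dropWhile (fun y => y == x)) := by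
  rw [pvRunScores]

theorem runScores_mem (n : Nat) (s : List Int) (hn : s.length ≤ n) (hs : s.Pairwise (· ≤ ·)) (z : Int) :
    z ∈ pvRunScores s ↔ ∃ v ∈ s, z = v * (List.count v s : Int) := by
  induction n generalizing s with
  | zero =>
    have : s = [] := List.length_eq_zero_iff.mp (Nat.le_zero.mp hn)
    subst this; simp [pvRunScores]
  | succ n ih =>
    match s with
    | [] => simp [pvRunScores]
    | x :: xs =>
      have hxt := List.takeWhile_append_dropWhile (p := fun y => y == x) (l := xs)
      set t := xs.takeWhile (fun y => y == x) with ht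
      set r := xs.dropWhile (fun y => y == x) with hrr
      have htall : ∀ y ∈ t, y = x := fun y hy => by
        simpa using List.mem_takeWhile_imp hy
      have hxs_le : ∀ y ∈ xs, x ≤ y := fun y hy => (List.pairwise_cons.mp hs).1 y hy
      have hr_sub : r.Sublist xs := List.dropWhile_sublist (fun y => y == x)
      have hr_pair : r.Pairwise (· ≤ ·) :=
        List.Pairwise.sublist (hr_sub.trans (List.sublist_cons_self x xs)) hs
      -- x does not occur after its run in the sorted list
      have hxnr : x ∉ r := by
        intro hx
        have hhead := List.head?_dropWhile_not (p := fun y => y == x) (l := xs)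
        rw [← hrr] at hhead
        cases hr2 : r with
        | nil => rw [hr2] at hx; exact absurd hx List.not_mem_nil
        | cons b rt =>
          rw [hr2] at hx hhead
          simp only [List.head?_cons] at hhead
          have hbx : b ≠ x := by simpa using hhead
          rcases List.mem_cons.mp hx with h1 | h1
          · exact hbx h1.symm
          · have hble : b ≤ x := (List.pairwise_cons.mp (hr2 ▸ hr_pair)).1 x h1
            have hbr : b ∈ r := hr2.symm ▸ List.mem_cons_self
            have hbxs : b ∈ xs := hr_sub.subset hbr
            exact hbx (le_antisymm hble (hxs_le b hbxs))
      have hrlen : r.length ≤ n := by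
        have h1 : r.length ≤ xs.length := List.length_dropWhile_le _ xs
        have h2 : xs.length + 1 ≤ n + 1 := by simpa using hn
        omega
      -- count of x in s is 1 + t.length
      have hcx : List.count x (x :: xs) = 1 + t.length := by
        have hsplit : List.count x xs = List.count x t + List.count x r := by
          rw [← hxt, List.count_append]
        have hct : List.count x t = t.length := by
          rw [List.count_eq_length]
          intro y hy; simp [htall y hy]
        have hcr : List.count x r = 0 := List.count_eq_zero.mpr hxnr
        rw [List.count_cons_self, hsplit, hct, hcr]
        omega
      -- counts of elements of r agree between s and r
      have hcr_eq : ∀ v ∈ r, List.count v (x :: xs) = List.count v r := by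
        intro v hv
        have hvx : v ≠ x := fun h => hxnr (h ▸ hv)
        have hvt : List.count v t = 0 := List.count_eq_zero.mpr (fun hvt => hvx (htall v hvt))
        rw [← hxt, List.count_cons, List.count_append, hvt]
        simp [Ne.symm hvx]
      rw [runScores_cons, ← ht, ← hrr, List.mem_cons, ih r hrlen hr_pair]
      constructor
      · rintro (h | ⟨v, hv, hzv⟩)
        · exact ⟨x, List.mem_cons_self, by rw [hcx]; push_cast at h ⊢; omega⟩
        · exact ⟨v, List.mem_cons_of_mem _ (hr_sub.subset hv), by rw [hcr_eq v hv]; exact hzv⟩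
      · rintro ⟨v, hv, hzv⟩
        rcases List.mem_cons.mp hv with h | h
        · subst h; left; rw [hcx] at hzv; push_cast at hzv ⊢; omega
        · rw [← hxt] at h
          rcases List.mem_append.mp h with h1 | h1
          · have := htall v h1; subst this
            left; rw [hcx] at hzv; push_cast at hzv ⊢; omega
          · right; exact ⟨v, h1, by rw [← hcr_eq v h1]; exact hzv⟩

-- two Int lists with the same members have the same max()
theorem max_mem_congr (l₁ l₂ : List Int) (h : ∀ z, z ∈ l₁ ↔ z ∈ l₂) :
    (PySem.List.max? l₁ (fun y => y)).getD 0 = (PySem.List.max? l₂ (fun y => y)).getD 0 := by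
  match hm1 : PySem.List.max? l₁ (fun y => y), hm2 : PySem.List.max? l₂ (fun y => y) with
  | none, none => rfl
  | none, some m2 =>
    have h1 : l₁ = [] := (PySem.List.max?_eq_none_iff _ _).mp hm1
    have : m2 ∈ l₂ := PySem.List.max?_mem hm2
    exact absurd ((h m2).mpr this) (by simp [h1])
  | some m1, none =>
    have h2 : l₂ = [] := (PySem.List.max?_eq_none_iff _ _).mp hm2
    have : m1 ∈ l₁ := PySem.List.max?_mem hm1
    exact absurd ((h m1).mp this) (by simp [h2])
  | some m1, some m2 =>
    have hle1 : m1 ≤ m2 := PySem.List.max?_isMax hm2 m1 ((h m1).mp (PySem.List.max?_mem hm1))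
    have hle2 : m2 ≤ m1 := PySem.List.max?_isMax hm1 m2 ((h m2).mpr (PySem.List.max?_mem hm2))
    simp [le_antisymm hle1 hle2]

-- ===== VERDICT (by name: the statement is the Claim_ definition above) =====
theorem yahtzee_spec : Claim_equal_yahtzee := by
  intro rolls _ _
  show yahtzee rolls = yahtzee_alt rolls
  unfold yahtzee yahtzee_alt
  simp only []
  rw [values_char rolls]
  apply max_mem_congr
  intro z
  have hperm : (PySem.List.sorted rolls (fun x => x) false).Perm rolls :=
    PySem.List.sorted_perm rolls (fun x => x) false
  have hpair : (PySem.List.sorted rolls (fun x => x) false).Pairwise (· ≤ ·) := by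
    simpa using PySem.List.sorted_pairwise rolls (fun x => x)
  rw [List.mem_map, runScores_mem (PySem.List.sorted rolls (fun x => x) false).length _ le_rfl hpair]
  constructor
  · rintro ⟨v, hv, hzv⟩
    exact ⟨v, hperm.mem_iff.mpr ((PySem.Set.mem_ofList rolls v).mp hv), by rw [hperm.count_eq]; exact hzv.symm⟩
  · rintro ⟨v, hv, hzv⟩
    exact ⟨v, (PySem.Set.mem_ofList rolls v).mpr (hperm.subset hv), by rw [← hperm.count_eq]; exact hzv.symm⟩
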